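-- pv_equiv track=rewrite | github.com/rieger07/discrete_event_systems_homework | homework3/main.py | is_a_function
-- ===== SOURCE A (Python) =====
-- def is_a_function(relation_tuples: set, domain: set, codomain: set) -> bool:
--     """
--     Checks if a relation (set of tuples) is a valid function f: A -> B.
--
--     Conditions checked:
--     1. Uniqueness: Each domain element maps to at most one codomain element.
--     2. Total: Every domain element must be in the relation (i.e., mapped).
--     """
--
--     # 1. Check Uniqueness (The "Vertical Line Test" for sets)
--     # Extract all inputs (first elements of the tuples)
--     inputs_in_relation = {x for x, y in relation_tuples}
--
--     # If the number of tuples is greater than the number of unique inputs,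
--     # then some input must map to multiple outputs (i.e., not unique).
--     if len(relation_tuples) > len(inputs_in_relation):
--         return False  # Fails the uniqueness test
--
--     # 2. Check Totality (Every domain element is used)
--     # The set of inputs used in the relation must exactly match the given domain.
--     if inputs_in_relation != domain:
--         return False  # Fails the totality test
--
--     # An optional check (but good practice): ensure outputs are in the codomain
--     outputs = {y for x, y in relation_tuples}
--     if not outputs.issubset(codomain):
--         return False  # Outputs must be elements of the codomain
--
--     return True
-- ===== SOURCE B (Python) =====
-- def is_a_function(relation_tuples: set, domain: set, codomain: set) -> bool:
--     mapping = {}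
--     for x, y in relation_tuples:
--         if x in mapping and mapping[x] != y:
--             return False
--         mapping[x] = y
--     if set(mapping) != domain:
--         return False
--     return all(y in codomain for y in mapping.values())
-- ===== Notes on version B (the rewrite author's own statement) =====
-- stated objective: idiomatic
-- what changed: B replaces A's cardinality trick (comparing len(relation) to the number of distinct inputs) and the separate output-set comprehension by one pass that builds an input->output dict, rejecting on an in-loop conflict, then checks the dict's keys against the domain and its values against the codomain.
import Mathlib
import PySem

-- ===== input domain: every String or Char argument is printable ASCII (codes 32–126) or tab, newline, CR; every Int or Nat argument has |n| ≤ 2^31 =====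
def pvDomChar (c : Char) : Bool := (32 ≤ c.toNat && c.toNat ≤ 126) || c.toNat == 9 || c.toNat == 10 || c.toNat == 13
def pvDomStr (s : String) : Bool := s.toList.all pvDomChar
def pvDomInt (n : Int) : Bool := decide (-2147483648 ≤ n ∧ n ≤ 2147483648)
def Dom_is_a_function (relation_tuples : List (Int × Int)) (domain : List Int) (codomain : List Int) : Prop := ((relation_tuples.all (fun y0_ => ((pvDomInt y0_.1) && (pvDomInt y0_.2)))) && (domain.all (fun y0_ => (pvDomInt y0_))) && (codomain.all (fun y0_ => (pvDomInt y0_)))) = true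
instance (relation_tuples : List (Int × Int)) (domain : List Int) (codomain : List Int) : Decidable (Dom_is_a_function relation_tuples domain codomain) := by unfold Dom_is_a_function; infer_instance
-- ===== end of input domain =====

-- B replaces A's cardinality trick and separate output comprehension with a single pass
-- building an input→output dict with an in-loop conflict check (objective: idiomatic).

-- ===== PORT A =====
def is_a_function (relation_tuples : List (Int × Int)) (domain : List Int) (codomain : List Int) : Bool :=
  -- inputs_in_relation = {x for x, y in relation_tuples}
  let inputs := PySem.Set.ofList (relation_tuples.map (fun p => p.1))
  -- if len(relation_tuples) > len(inputs_in_relation): return False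
  if relation_tuples.length > inputs.length then false
  -- if inputs_in_relation != domain: return False
  else if ¬ PySem.Set.equal inputs domain then false
  else
    -- outputs = {y for x, y in relation_tuples}
    let outputs := PySem.Set.ofList (relation_tuples.map (fun p => p.2))
    -- if not outputs.issubset(codomain): return False
    if ¬ PySem.Set.issubset outputs codomain then false
    else true

-- ===== PORT B =====
-- the for-loop of Source B: returns none where the loop hits `return False`
def altLoop (rel : List (Int × Int)) (mapping : PySem.Dict Int Int) : Option (PySem.Dict Int Int) :=
  match rel with
  | [] => some mapping
  | (x, y) :: rest =>
    match mapping.get? x with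
    | some y' => if y' ≠ y then none else altLoop rest (mapping.insert x y)
    | none => altLoop rest (mapping.insert x y)

def is_a_function_alt (relation_tuples : List (Int × Int)) (domain : List Int) (codomain : List Int) : Bool :=
  match altLoop relation_tuples PySem.Dict.empty with
  | none => false
  | some m =>
    -- if set(mapping) != domain: return False
    if ¬ PySem.Set.equal m.keys domain then false
    -- return all(y in codomain for y in mapping.values())
    else m.values.all (fun y => PySem.Set.contains codomain y)

-- ===== PRECONDITION & SPEC =====
-- Pre_: the Python parameter relation_tuples is a set, so its list representation holds
-- DISTINCT elements (type convention); Pre_ states exactly that invariant and excludes no actual Python input.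
def Pre_is_a_function (relation_tuples : List (Int × Int)) (domain : List Int) (codomain : List Int) : Prop :=
  relation_tuples.Nodup
instance (relation_tuples : List (Int × Int)) (domain : List Int) (codomain : List Int) : Decidable (Pre_is_a_function relation_tuples domain codomain) := by unfold Pre_is_a_function; infer_instance

def pvWitness_is_a_function : (List (Int × Int)) × List Int × List Int := ([(0, 1), (2, 1)], [0, 2], [1, 3])

def Spec_is_a_function (relation_tuples : List (Int × Int)) (domain : List Int) (codomain : List Int) (out : Bool) : Prop := out = is_a_function_alt relation_tuples domain codomain
instance (relation_tuples : List (Int × Int)) (domain : List Int) (codomain : List Int) (out : Bool) : Decidable (Spec_is_a_function relation_tuples domain codomain out) := by unfold Spec_is_a_function; infer_instance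

-- ===== CLAIM (what is proved, stated in full; the proofs are below) =====
def Claim_equal_is_a_function : Prop := ∀ (relation_tuples : List (Int × Int)) (domain : List Int) (codomain : List Int), Dom_is_a_function relation_tuples domain codomain → Pre_is_a_function relation_tuples domain codomain → Spec_is_a_function relation_tuples domain codomain (is_a_function relation_tuples domain codomain)

-- ===== LEMMAS AND PROOFS =====

-- When all first components are fresh and pairwise distinct, the loop never conflicts and appends.
lemma altLoop_fresh (rel : List (Int × Int)) (m : PySem.Dict Int Int)
    (hfresh : ∀ p ∈ rel, m.contains p.1 = false)
    (hnd : (rel.map Prod.fst).Nodup) :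
    ∃ m', altLoop rel m = some m' ∧ m'.items = m.items ++ rel := by
  induction rel generalizing m with
  | nil => exact ⟨m, rfl, by simp⟩
  | cons p rest ih =>
    obtain ⟨x, y⟩ := p
    simp only [List.map_cons, List.nodup_cons] at hnd
    have hc : m.contains x = false := hfresh (x, y) (by simp)
    have hg : m.get? x = none := (PySem.Dict.get?_eq_none_iff_contains m x).mpr hc
    have hfresh' : ∀ p ∈ rest, (m.insert x y).contains p.1 = false := by
      intro p hp
      rw [PySem.Dict.contains_insert]
      have hne : p.1 ≠ x := by
        intro h; exact hnd.1 (h ▸ (List.mem_map.mpr ⟨p, hp, rfl⟩))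
      simp [hne, hfresh p (by simp [hp])]
    obtain ⟨m', h1, h2⟩ := ih (m.insert x y) hfresh' hnd.2
    refine ⟨m', ?_, ?_⟩
    · simp [altLoop, hg, h1]
    · rw [h2, PySem.Dict.items_insert_of_not_contains m y hc]; simp

-- If the loop completes on a duplicate-free relation, the first components are pairwise distinct.
lemma altLoop_some_nodup_fst (rel : List (Int × Int)) (m : PySem.Dict Int Int)
    (hnd : rel.Nodup)
    (hm : ∀ a b, m.get? a = some b → (a, b) ∉ rel)
    (hsome : altLoop rel m ≠ none) :
    (rel.map Prod.fst).Nodup ∧ ∀ a b, m.get? a = some b → a ∉ rel.map Prod.fst := by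
  induction rel generalizing m with
  | nil => exact ⟨by simp, by simp⟩
  | cons p rest ih =>
    obtain ⟨x, y⟩ := p
    simp only [List.nodup_cons] at hnd
    have hg : m.get? x = none := by
      cases hgx : m.get? x with
      | none => rfl
      | some y' =>
        by_cases hyy : y' = y
        · exact absurd (by simp [hyy]) (hm x y' hgx)
        · exfalso; apply hsome; simp [altLoop, hgx, hyy]
    have hrec : altLoop rest (m.insert x y) ≠ none := by
      intro h; apply hsome; simp [altLoop, hg, h]
    have hm' : ∀ a b, (m.insert x y).get? a = some b → (a, b) ∉ rest := by
      intro a b hab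
      by_cases hax : a = x
      · subst hax
        rw [PySem.Dict.get?_insert_self] at hab
        cases hab; exact hnd.1
      · rw [PySem.Dict.get?_insert_of_ne m y hax] at hab
        intro hmem
        exact hm a b hab (by simp [hmem])
    obtain ⟨ih1, ih2⟩ := ih (m.insert x y) hnd.2 hm' hrec
    have hxnot : x ∉ rest.map Prod.fst := by
      have := ih2 x y (PySem.Dict.get?_insert_self m x y)
      exact this
    constructor
    · simp only [List.map_cons, List.nodup_cons]; exact ⟨hxnot, ih1⟩
    · intro a b hab
      have hax : a ≠ x := by intro h; rw [h, hg] at hab; cases hab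
      have : a ∉ rest.map Prod.fst :=
        ih2 a b (by rw [PySem.Dict.get?_insert_of_ne m y hax]; exact hab)
      simp only [List.map_cons, List.mem_cons]
      rintro (h | h)
      · exact hax h
      · exact this h

-- ofList strictly shrinks a list with duplicates
lemma length_ofList_lt_of_not_nodup {l : List Int} (h : ¬ l.Nodup) :
    (PySem.Set.ofList l).length < l.length := by
  rcases Nat.lt_or_ge (PySem.Set.ofList l).length l.length with hlt | hge
  · exact hlt
  · exfalso
    have hsub : PySem.Set.ofList l ⊆ l := fun x hx => (PySem.Set.mem_ofList l x).mp hx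
    have hsp : (PySem.Set.ofList l).Subperm l := (PySem.Set.nodup_ofList l).subperm hsub
    have hperm := hsp.perm_of_length_le hge
    exact h (hperm.nodup_iff.mp (PySem.Set.nodup_ofList l))

lemma issubset_ofList_eq_all (l cod : List Int) :
    PySem.Set.issubset (PySem.Set.ofList l) cod = l.all (fun y => PySem.Set.contains cod y) := by
  rw [Bool.eq_iff_iff]
  simp [PySem.Set.issubset_iff, PySem.Set.mem_ofList, List.all_eq_true]

-- ===== VERDICT (by name: the statement is the Claim_ definition above) =====
theorem is_a_function_spec : Claim_equal_is_a_function := by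
  intro rel dom cod _ hpre
  unfold Spec_is_a_function is_a_function is_a_function_alt
  by_cases hnd : (rel.map Prod.fst).Nodup
  · -- no duplicate inputs: the loop succeeds and both sides run the same set checks
    obtain ⟨m, hloop, hitems⟩ := altLoop_fresh rel PySem.Dict.empty
      (fun p _ => PySem.Dict.contains_empty p.1) hnd
    have hempty : (PySem.Dict.empty : PySem.Dict Int Int).items = [] := rfl
    have hkeys : m.keys = rel.map Prod.fst := by
      simp [PySem.Dict.keys, hitems, hempty]
    have hvals : m.values = rel.map Prod.snd := by
      simp [PySem.Dict.values, hitems, hempty]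
    have hin : PySem.Set.ofList (rel.map (fun p => p.1)) = rel.map Prod.fst := by
      have : rel.map (fun p => p.1) = rel.map Prod.fst := rfl
      rw [this]; exact PySem.Set.ofList_eq_self_of_nodup _ hnd
    have hlen : ¬ (rel.length > (PySem.Set.ofList (rel.map (fun p => p.1))).length) := by
      rw [hin, List.length_map]; omega
    rw [hloop]
    simp only [hin, hkeys, hvals]
    by_cases heq : PySem.Set.equal (rel.map Prod.fst) dom
    · simp [heq, issubset_ofList_eq_all]
    · simp [heq]
  · -- a duplicated input: A's cardinality test fails, B's loop hits the conflict branch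
    have hA : rel.length > (PySem.Set.ofList (rel.map (fun p => p.1))).length := by
      have := length_ofList_lt_of_not_nodup (l := rel.map Prod.fst) hnd
      simpa using this
    have hB : altLoop rel PySem.Dict.empty = none := by
      by_contra h
      exact hnd (altLoop_some_nodup_fst rel PySem.Dict.empty hpre
        (fun a b hab => by rw [PySem.Dict.get?_empty] at hab; cases hab) h).1
    rw [hB]
    simp [hA]
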